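-- pv_equiv track=rewrite | github.com/helpdeskmycbhelp/my-flask-app | import_excel.py | find_owner_indices
-- ===== SOURCE A (Python) =====
-- from typing import List, Tuple, Optional
--
-- def find_owner_indices(owners: List[dict], owner_name: str, role: str, reg_date: str) -> Tuple[Optional[int], Optional[int]]:
--     """
--     Return (idx_same_date, idx_same_owner_any_date) where either can be None.
--     idx_same_date: owner with same (name, role, registration_date)
--     idx_same_owner_any_date: first owner with same (name, role) ignoring date
--     """
--     reg_date_norm = (reg_date or "")
--     idx_same_date = next(
--         (i for i, o in enumerate(owners)
--          if o.get("owner_name") == owner_name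
--          and o.get("role") == role
--          and (o.get("registration_date") or "") == reg_date_norm),
--         None
--     )
--     idx_same_owner_any_date = next(
--         (i for i, o in enumerate(owners)
--          if o.get("owner_name") == owner_name
--          and o.get("role") == role),
--         None
--     )
--     return idx_same_date, idx_same_owner_any_date
-- ===== SOURCE B (Python) =====
-- def find_owner_indices(owners, owner_name, role, reg_date):
--     # One pass over owners with two accumulators instead of two next() scans.
--     reg_date_norm = (reg_date or "")
--     idx_same_date = None
--     idx_same_owner_any_date = None
--     for i, o in enumerate(owners):
--         if o.get("owner_name") == owner_name and o.get("role") == role: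
--             if idx_same_owner_any_date is None:
--                 idx_same_owner_any_date = i
--             if idx_same_date is None and (o.get("registration_date") or "") == reg_date_norm:
--                 idx_same_date = i
--             if idx_same_date is not None and idx_same_owner_any_date is not None:
--                 break
--     return idx_same_date, idx_same_owner_any_date
-- ===== Notes on version B (the rewrite author's own statement) =====
-- stated objective: alternative
-- what changed: Replaces A's two independent next()/generator scans over owners with a single explicit loop carrying two Option accumulators and an early break once both indices are found.
import Mathlib
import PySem

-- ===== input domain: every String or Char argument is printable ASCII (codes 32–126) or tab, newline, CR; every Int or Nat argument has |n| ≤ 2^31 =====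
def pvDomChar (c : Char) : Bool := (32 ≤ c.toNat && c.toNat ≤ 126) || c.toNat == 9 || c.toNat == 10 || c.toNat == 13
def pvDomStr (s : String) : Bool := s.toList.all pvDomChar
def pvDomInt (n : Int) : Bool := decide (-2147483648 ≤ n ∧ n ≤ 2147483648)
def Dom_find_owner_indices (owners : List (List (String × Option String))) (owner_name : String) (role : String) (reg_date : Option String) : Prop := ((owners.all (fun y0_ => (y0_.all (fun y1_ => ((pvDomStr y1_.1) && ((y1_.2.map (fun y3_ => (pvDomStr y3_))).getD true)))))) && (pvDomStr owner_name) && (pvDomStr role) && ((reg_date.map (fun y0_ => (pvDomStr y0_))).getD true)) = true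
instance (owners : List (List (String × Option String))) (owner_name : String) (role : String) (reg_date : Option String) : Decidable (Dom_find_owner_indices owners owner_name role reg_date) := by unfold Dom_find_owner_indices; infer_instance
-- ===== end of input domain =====

-- B replaces A's two generator scans by one loop with two accumulators and an early break (alternative decomposition, same cost).

-- ===== PORT A =====
-- o.get(k) on the dict (assoc list, first match): PySem.Dict.get?, flattened (missing key -> Python None)
def pvGetA (o : List (String × Option String)) (k : String) : Option String :=
  ((PySem.Dict.mk o).get? k).getD none

-- first generator: first i with name, role and normalized date matching (enumerate carried as Int counter)
def pvScanDate (owners : List (List (String × Option String))) (owner_name role regNorm : String) (i : Int) : Option Int :=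
  match owners with
  | [] => none
  | o :: rest =>
    if pvGetA o "owner_name" == some owner_name && pvGetA o "role" == some role
        && (pvGetA o "registration_date").getD "" == regNorm then some i
    else pvScanDate rest owner_name role regNorm (i + 1)

-- second generator: first i with name and role matching
def pvScanAny (owners : List (List (String × Option String))) (owner_name role : String) (i : Int) : Option Int :=
  match owners with
  | [] => none
  | o :: rest =>
    if pvGetA o "owner_name" == some owner_name && pvGetA o "role" == some role then some i
    else pvScanAny rest owner_name role (i + 1)

def find_owner_indices (owners : List (List (String × Option String))) (owner_name : String) (role : String) (reg_date : Option String) : Option Int × Option Int :=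
  let reg_date_norm := reg_date.getD ""
  (pvScanDate owners owner_name role reg_date_norm 0, pvScanAny owners owner_name role 0)

-- ===== PORT B =====
-- single loop of Source B: index i, accumulators (idx_same_date, idx_same_owner_any_date), break when both set
def pvLoopB (owners : List (List (String × Option String))) (owner_name role regNorm : String)
    (i : Int) (sd anyd : Option Int) : Option Int × Option Int :=
  match owners with
  | [] => (sd, anyd)
  | o :: rest =>
    let nm := ((PySem.Dict.mk o).get? "owner_name").getD none
    let rl := ((PySem.Dict.mk o).get? "role").getD none
    if nm == some owner_name && rl == some role then
      let anyd' := if anyd.isNone then some i else anyd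
      let dt := (((PySem.Dict.mk o).get? "registration_date").getD none).getD ""
      let sd' := if sd.isNone && dt == regNorm then some i else sd
      if sd'.isSome && anyd'.isSome then (sd', anyd')
      else pvLoopB rest owner_name role regNorm (i + 1) sd' anyd'
    else pvLoopB rest owner_name role regNorm (i + 1) sd anyd

def find_owner_indices_alt (owners : List (List (String × Option String))) (owner_name : String) (role : String) (reg_date : Option String) : Option Int × Option Int :=
  pvLoopB owners owner_name role (reg_date.getD "") 0 none none

-- ===== PRECONDITION & SPEC =====
def Spec_find_owner_indices (owners : List (List (String × Option String))) (owner_name : String) (role : String) (reg_date : Option String) (out : Option Int × Option Int) : Prop := out = find_owner_indices_alt owners owner_name role reg_date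
instance (owners : List (List (String × Option String))) (owner_name : String) (role : String) (reg_date : Option String) (out : Option Int × Option Int) : Decidable (Spec_find_owner_indices owners owner_name role reg_date out) := by unfold Spec_find_owner_indices; infer_instance

-- ===== CLAIM (what is proved, stated in full; the proofs are below) =====
def Claim_equal_find_owner_indices : Prop := ∀ (owners : List (List (String × Option String))) (owner_name : String) (role : String) (reg_date : Option String), Dom_find_owner_indices owners owner_name role reg_date → Spec_find_owner_indices owners owner_name role reg_date (find_owner_indices owners owner_name role reg_date)

-- ===== LEMMAS AND PROOFS =====
-- once the any-date accumulator is set, the loop only still searches for the date index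
theorem pvLoopB_any_set (owners : List (List (String × Option String))) (owner_name role regNorm : String)
    (i k : Int) :
    pvLoopB owners owner_name role regNorm i none (some k)
      = (pvScanDate owners owner_name role regNorm i, some k) := by
  induction owners generalizing i with
  | nil => simp [pvLoopB, pvScanDate]
  | cons o rest ih =>
    simp only [pvLoopB, pvScanDate, pvGetA]
    by_cases hnr : (((PySem.Dict.mk o).get? "owner_name").getD none == some owner_name
        && ((PySem.Dict.mk o).get? "role").getD none == some role) = true
    · simp only [hnr, if_true]
      by_cases hd : ((((PySem.Dict.mk o).get? "registration_date").getD none).getD "" == regNorm) = true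
      · simp [hd]
      · simp [hd, ih]
    · simp [hnr, ih]

-- the fused loop started empty computes exactly what A's two scans compute
theorem pvLoopB_eq (owners : List (List (String × Option String))) (owner_name role regNorm : String)
    (i : Int) :
    pvLoopB owners owner_name role regNorm i none none
      = (pvScanDate owners owner_name role regNorm i, pvScanAny owners owner_name role i) := by
  induction owners generalizing i with
  | nil => simp [pvLoopB, pvScanDate, pvScanAny]
  | cons o rest ih =>
    simp only [pvLoopB, pvScanDate, pvScanAny, pvGetA]
    by_cases hnr : (((PySem.Dict.mk o).get? "owner_name").getD none == some owner_name
        && ((PySem.Dict.mk o).get? "role").getD none == some role) = true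
    · simp only [hnr, if_true]
      by_cases hd : ((((PySem.Dict.mk o).get? "registration_date").getD none).getD "" == regNorm) = true
      · simp [hd]
      · simp [hd, pvLoopB_any_set]
    · simp [hnr, ih]

-- ===== VERDICT (by name: the statement is the Claim_ definition above) =====
theorem find_owner_indices_spec : Claim_equal_find_owner_indices := by
  intro owners owner_name role reg_date _
  unfold Spec_find_owner_indices find_owner_indices find_owner_indices_alt
  rw [pvLoopB_eq]
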